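-- pv_equiv track=rewrite | github.com/UNLV-CS472-672/2024-F-GROUP1-Tabby | server/tabby_server/services/google_books.py | _sanitize_query_field
-- ===== SOURCE A (Python) =====
-- _keywords_to_sanitize: frozenset[str] = frozenset(
--     ["intitle", "inauthor", "inpublisher", "subject", "isbn"]
-- )
--
-- def _sanitize_query_field(field_value: str) -> str:
--     """Sanitizes a Google Book query field to make it safe for searching.
--
--     For example, suppose 'phrase' gets the value:
--
--         kingdoms to which people are subject:a full analysis
--
--     It might use 'subject:a full analysis' as a separate field. To solve this,
--     we simply add a space inbetween:
--
--         kingdoms to which people are subject : a full analysis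
--
--     Args:
--         field_value: String to sanitize.
--     Returns:
--         Sanitized string.
--     """
--     # find each keyword
--     for keyword in _keywords_to_sanitize:
--         indicator = f"{keyword}:"
--         parts = field_value.split(indicator)
--         if len(parts) >= 2:
--             # found an indicator, sanitize by adding a space inbetween
--             sep = f"{keyword} : "
--             field_value = sep.join(parts)
--     return field_value
-- ===== SOURCE B (Python) =====
-- import re
--
-- _sanitize_pattern = re.compile(r"(intitle|inauthor|inpublisher|subject|isbn):")
--
--
-- def _sanitize_query_field(field_value: str) -> str:
--     """Sanitize a Google Books query field in one regex pass: spaces are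
--     inserted around the colon of every keyword separator."""
--     return _sanitize_pattern.sub(r"\1 : ", field_value)
-- ===== Notes on version B (the rewrite author's own statement) =====
-- stated objective: idiomatic
-- what changed: The five sequential split/join passes (one per keyword, each rebuilding the whole string) are replaced by a single compiled-regex substitution with a plain alternation pattern: one left-to-right scan that inserts the spaces around the colon of every keyword separator.
import Mathlib
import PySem

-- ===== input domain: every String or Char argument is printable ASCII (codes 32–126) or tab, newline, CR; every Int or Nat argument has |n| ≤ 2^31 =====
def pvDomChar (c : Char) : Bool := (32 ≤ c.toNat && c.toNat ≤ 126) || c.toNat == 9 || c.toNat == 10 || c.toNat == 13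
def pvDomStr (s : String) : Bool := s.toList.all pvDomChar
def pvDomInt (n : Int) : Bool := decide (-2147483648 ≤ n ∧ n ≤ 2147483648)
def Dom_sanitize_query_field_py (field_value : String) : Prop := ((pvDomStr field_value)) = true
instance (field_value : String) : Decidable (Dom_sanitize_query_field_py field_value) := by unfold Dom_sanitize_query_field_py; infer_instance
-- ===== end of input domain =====

-- B replaces A's five sequential split/join passes by a single left-to-right scan (a regex
-- alternation substitution in Python); same return value, no speed claim (objective: idiomatic).

-- the five keywords; Python iterates a frozenset, whose order is unspecified — the result is
-- order-independent (the proof below never uses this particular order), so we fix this order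
def pvKeywords : List (List Char) :=
  [['i','n','t','i','t','l','e'], ['i','n','a','u','t','h','o','r'],
   ['i','n','p','u','b','l','i','s','h','e','r'], ['s','u','b','j','e','c','t'], ['i','s','b','n']]

-- ===== PORT A =====
-- one loop iteration of A: parts = field_value.split(keyword + ":"); if len(parts) >= 2: join with keyword + " : "
def saniStepA (fv : List Char) (keyword : List Char) : List Char :=
  let parts := PySem.Chars.splitOn fv (keyword ++ [':'])
  if 2 ≤ parts.length then PySem.Chars.join (keyword ++ [' ', ':', ' ']) parts else fv

def sanitize_query_field_py (field_value : String) : String :=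
  String.ofList (pvKeywords.foldl saniStepA field_value.toList)

-- ===== PORT B =====
-- transliteration of re.sub(r"(intitle|inauthor|inpublisher|subject|isbn):", r"\1 : ", s):
-- scan left to right; at each position try the alternation, on a match emit "kw : " and skip past "kw:"
def saniScan : List Char → List Char
  | [] => []
  | c :: t =>
    match pvKeywords.find? (fun k => (k ++ [':']).isPrefixOf (c :: t)) with
    | some k => (k ++ [' ', ':', ' ']) ++ saniScan (List.drop (k.length + 1) (c :: t))
    | none => c :: saniScan t
termination_by l => l.length
decreasing_by all_goals simp [List.length_drop]

def sanitize_query_field_py_alt (field_value : String) : String :=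
  String.ofList (saniScan field_value.toList)

-- ===== PRECONDITION & SPEC =====
def Spec_sanitize_query_field_py (field_value : String) (out : String) : Prop := out = sanitize_query_field_py_alt field_value
instance (field_value : String) (out : String) : Decidable (Spec_sanitize_query_field_py field_value out) := by unfold Spec_sanitize_query_field_py; infer_instance

-- ===== CLAIM (what is proved, stated in full; the proofs are below) =====
def Claim_equal_sanitize_query_field_py : Prop := ∀ (field_value : String), Dom_sanitize_query_field_py field_value → Spec_sanitize_query_field_py field_value (sanitize_query_field_py field_value)

-- ===== LEMMAS AND PROOFS =====

-- single-keyword replacement pass: what one split/join iteration of A computes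
def rep1 (k : List Char) : List Char → List Char
  | [] => []
  | c :: t =>
    if (k ++ [':']).isPrefixOf (c :: t) then
      (k ++ [' ', ':', ' ']) ++ rep1 k (List.drop (k.length + 1) (c :: t))
    else c :: rep1 k t
termination_by l => l.length
decreasing_by all_goals simp [List.length_drop]

-- fuel-free model of PySem.Chars.splitOn
def splitP (sep : List Char) (hsep : sep ≠ []) : List Char → List (List Char)
  | [] => [[]]
  | c :: t =>
    if sep.isPrefixOf (c :: t) then [] :: splitP sep hsep (List.drop sep.length (c :: t))
    else (splitP sep hsep t).modifyHead (c :: ·)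
termination_by l => l.length
decreasing_by
  all_goals have hpos : 0 < sep.length := List.length_pos_iff.mpr hsep
  all_goals simp [List.length_drop]
  all_goals omega

theorem rep1_nil (k : List Char) : rep1 k [] = [] := by simp [rep1]

theorem rep1_pos (k : List Char) (c : Char) (t : List Char)
    (hp : (k ++ [':']).isPrefixOf (c :: t) = true) :
    rep1 k (c :: t) = (k ++ [' ', ':', ' ']) ++ rep1 k (List.drop (k.length + 1) (c :: t)) := by
  rw [rep1, if_pos hp]

theorem rep1_neg (k : List Char) (c : Char) (t : List Char)
    (hp : ¬ (k ++ [':']).isPrefixOf (c :: t) = true) :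
    rep1 k (c :: t) = c :: rep1 k t := by
  rw [rep1, if_neg hp]

theorem splitP_ne_nil (sep : List Char) (hsep : sep ≠ []) (l : List Char) :
    splitP sep hsep l ≠ [] := by
  induction l using splitP.induct sep hsep with
  | case1 => simp [splitP]
  | case2 c t hp ih => simp [splitP, hp]
  | case3 c t hp ih =>
    rw [splitP, if_neg hp]
    cases h : splitP sep hsep t with
    | nil => exact absurd h ih
    | cons x xs => simp

theorem go_eq (sep : List Char) (hsep : sep ≠ []) (fuel : Nat) :
    ∀ (l cur : List Char) (acc : List (List Char)), l.length < fuel →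
    PySem.Chars.splitOn.go sep fuel l cur acc
      = acc.reverse ++ (splitP sep hsep l).modifyHead (cur.reverse ++ ·) := by
  induction fuel with
  | zero => intro l cur acc h; omega
  | succ n ih =>
    intro l cur acc h
    cases l with
    | nil => simp [PySem.Chars.splitOn.go, splitP]
    | cons c t =>
      rw [PySem.Chars.splitOn.go]
      by_cases hp : sep.isPrefixOf (c :: t) = true
      · have hlen : (List.drop sep.length (c :: t)).length < n := by
          have : 0 < sep.length := List.length_pos_iff.mpr hsep
          simp only [List.length_drop, List.length_cons] at *
          omega
        rw [if_pos hp, ih _ _ _ hlen]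
        cases hS : splitP sep hsep (List.drop sep.length (c :: t)) with
        | nil => exact absurd hS (splitP_ne_nil _ _ _)
        | cons a as => simp [splitP, hp, hS, List.modifyHead]
      · have hlen : t.length < n := by simp at h; omega
        rw [if_neg hp, ih _ _ _ hlen]
        rw [splitP, if_neg hp, List.modifyHead_modifyHead]
        congr 2
        funext x
        simp

theorem splitOn_eq (sep : List Char) (hsep : sep ≠ []) (l : List Char) :
    PySem.Chars.splitOn l sep = splitP sep hsep l := by
  rw [PySem.Chars.splitOn, go_eq sep hsep _ _ _ _ (by omega)]
  cases h : splitP sep hsep l with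
  | nil => exact absurd h (splitP_ne_nil sep hsep l)
  | cons x xs => simp

theorem intercalate_cons (sep x : List Char) (S : List (List Char)) (h : S ≠ []) :
    List.intercalate sep (x :: S) = x ++ sep ++ List.intercalate sep S := by
  cases S with
  | nil => exact absurd rfl h
  | cons y t => simp [List.intercalate, List.intersperse]

theorem join_modifyHead_cons (sep : List Char) (c : Char) (S : List (List Char)) (h : S ≠ []) :
    PySem.Chars.join sep (S.modifyHead (c :: ·)) = c :: PySem.Chars.join sep S := by
  cases S with
  | nil => exact absurd rfl h
  | cons x t =>
    cases t with
    | nil => simp [PySem.Chars.join, List.intercalate, List.modifyHead]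
    | cons y u =>
      show PySem.Chars.join sep ((c :: x) :: y :: u) = _
      rw [PySem.Chars.join, PySem.Chars.join,
        intercalate_cons sep _ (y :: u) (by simp), intercalate_cons sep _ (y :: u) (by simp)]
      simp

theorem join_splitP (k : List Char) (l : List Char) :
    PySem.Chars.join (k ++ [' ', ':', ' ']) (splitP (k ++ [':']) (by simp) l) = rep1 k l := by
  induction l using splitP.induct (k ++ [':']) (by simp) with
  | case1 => simp [splitP, rep1, PySem.Chars.join, List.intercalate]
  | case2 c t hp ih =>
    rw [splitP, if_pos hp, rep1_pos k c t hp, PySem.Chars.join,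
      intercalate_cons _ _ _ (splitP_ne_nil _ _ _)]
    rw [PySem.Chars.join] at ih
    simp only [List.length_append, List.length_cons, List.length_nil] at ih ⊢
    rw [ih]
    simp
  | case3 c t hp ih =>
    rw [splitP, if_neg hp, join_modifyHead_cons _ _ _ (splitP_ne_nil _ _ _), ih,
      rep1_neg k c t hp]

theorem splitP_singleton (sep : List Char) (hsep : sep ≠ []) (l x : List Char)
    (h : splitP sep hsep l = [x]) : x = l := by
  induction l using splitP.induct sep hsep generalizing x with
  | case1 =>
    rw [splitP] at h
    simp at h
    exact h
  | case2 c t hp ih =>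
    rw [splitP, if_pos hp] at h
    cases hS : splitP sep hsep (List.drop sep.length (c :: t)) with
    | nil => exact absurd hS (splitP_ne_nil _ _ _)
    | cons y ys => rw [hS] at h; simp at h
  | case3 c t hp ih =>
    rw [splitP, if_neg hp] at h
    cases hS : splitP sep hsep t with
    | nil => exact absurd hS (splitP_ne_nil sep hsep t)
    | cons y ys =>
      rw [hS] at h
      simp only [List.modifyHead] at h
      cases ys with
      | nil =>
        simp at h
        have hy := ih y hS
        rw [← h, hy]
      | cons z zs => simp at h

theorem stepA_eq (fv k : List Char) : saniStepA fv k = rep1 k fv := by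
  rw [saniStepA]
  simp only [splitOn_eq (k ++ [':']) (by simp) fv]
  by_cases h2 : 2 ≤ (splitP (k ++ [':']) (by simp) fv).length
  · simp only [if_pos h2]
    exact join_splitP k fv
  · simp only [if_neg h2]
    have hne := splitP_ne_nil (k ++ [':']) (by simp : (k ++ [':']) ≠ []) fv
    cases hS : splitP (k ++ [':']) (by simp : (k ++ [':']) ≠ []) fv with
    | nil => exact absurd hS hne
    | cons x xs =>
      cases xs with
      | cons y ys => rw [hS] at h2; simp at h2
      | nil =>
        have hx : x = fv := splitP_singleton _ _ _ _ hS
        have hj := join_splitP k fv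
        rw [hS, hx] at hj
        rw [← hj]
        simp [PySem.Chars.join, List.intercalate]

-- keyword facts, discharged by computation
theorem DC0 : ∀ k ∈ pvKeywords, ' ' ∉ k ∧ k ≠ [] := by decide

theorem DC1 : ∀ b ∈ pvKeywords, ∀ a ∈ pvKeywords, a ≠ b → ∀ p ∈ List.range (b.length + 1),
    ¬ ((a ++ [':']) <+: List.drop p (b ++ [':'])) ∧ ¬ (List.drop p (b ++ [':']) <+: (a ++ [':'])) := by
  decide

theorem DC2 : ∀ b ∈ pvKeywords, ∀ a ∈ pvKeywords, a ≠ b → ∀ p ∈ List.range (b.length + 3),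
    ¬ ((a ++ [':']) <+: List.drop p (b ++ [' ', ':', ' '])) ∧ ¬ (List.drop p (b ++ [' ', ':', ' ']) <+: (a ++ [':'])) := by
  decide

theorem not_prefix_append (x s z : List Char) (h1 : ¬ x <+: s) (h2 : ¬ s <+: x) :
    ¬ x <+: s ++ z :=
  fun h => (List.prefix_or_prefix_of_prefix h (List.prefix_append s z)).elim h1 h2

theorem rep1_passthru (k seg : List Char)
    (hseg : ∀ p, p < seg.length → ¬ ((k ++ [':']) <+: List.drop p seg) ∧ ¬ (List.drop p seg <+: (k ++ [':']))) :
    ∀ v, rep1 k (seg ++ v) = seg ++ rep1 k v := by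
  induction seg with
  | nil => intro v; simp
  | cons x s ih =>
    intro v
    have h0 := hseg 0 (by simp)
    simp only [List.drop_zero] at h0
    have hnp : ¬ (k ++ [':']) <+: ((x :: s) ++ v) := not_prefix_append _ _ _ h0.1 h0.2
    rw [List.cons_append, rep1_neg _ _ _ (by simpa [List.isPrefixOf_iff_prefix] using hnp),
      ih (fun p hp => by simpa using hseg (p + 1) (by simpa using hp)) v]
    simp

theorem rep1_match (k v : List Char) :
    rep1 k ((k ++ [':']) ++ v) = (k ++ [' ', ':', ' ']) ++ rep1 k v := by
  have hp : (k ++ [':']).isPrefixOf ((k ++ [':']) ++ v) = true :=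
    List.isPrefixOf_iff_prefix.mpr (List.prefix_append _ _)
  have hdrop : List.drop (k.length + 1) ((k ++ [':']) ++ v) = v := by
    have h : (k ++ [':']).length = k.length + 1 := by simp
    rw [← h, List.drop_left]
  cases hL : (k ++ [':']) ++ v with
  | nil => simp at hL
  | cons c t =>
    rw [hL] at hp hdrop
    rw [rep1_pos k c t hp, hdrop]

theorem passthru_pat (a b : List Char) (ha : a ∈ pvKeywords) (hb : b ∈ pvKeywords) (hne : a ≠ b)
    (v : List Char) : rep1 a ((b ++ [':']) ++ v) = (b ++ [':']) ++ rep1 a v :=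
  rep1_passthru a _ (fun p hp => DC1 b hb a ha hne p (List.mem_range.mpr (by simpa using hp))) v

theorem passthru_rep (a b : List Char) (ha : a ∈ pvKeywords) (hb : b ∈ pvKeywords) (hne : a ≠ b)
    (v : List Char) : rep1 a ((b ++ [' ', ':', ' ']) ++ v) = (b ++ [' ', ':', ' ']) ++ rep1 a v :=
  rep1_passthru a _ (fun p hp => DC2 b hb a ha hne p (List.mem_range.mpr (by simpa using hp))) v

def foldRep (l : List Char) (ks : List (List Char)) : List Char :=
  ks.foldl (fun l k => rep1 k l) l

theorem foldA_eq (ks : List (List Char)) : ∀ l, List.foldl saniStepA l ks = foldRep l ks := by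
  induction ks with
  | nil => intro l; rfl
  | cons k ks ih =>
    intro l
    show List.foldl saniStepA (saniStepA l k) ks = foldRep (rep1 k l) ks
    rw [ih, stepA_eq]

theorem foldRep_nil (ks : List (List Char)) : foldRep [] ks = [] := by
  induction ks with
  | nil => rfl
  | cons k ks ih => show foldRep (rep1 k []) ks = []; rw [rep1_nil]; exact ih

theorem passthru_fold1 (b : List Char) (ks : List (List Char))
    (hks : ∀ x ∈ ks, x ∈ pvKeywords ∧ x ≠ b) (hb : b ∈ pvKeywords) :
    ∀ v, foldRep ((b ++ [':']) ++ v) ks = (b ++ [':']) ++ foldRep v ks := by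
  induction ks with
  | nil => intro v; rfl
  | cons a ks ih =>
    intro v
    have ha := hks a (by simp)
    show foldRep (rep1 a ((b ++ [':']) ++ v)) ks = (b ++ [':']) ++ foldRep (rep1 a v) ks
    rw [passthru_pat a b ha.1 hb ha.2]
    exact ih (fun x hx => hks x (by simp [hx])) (rep1 a v)

theorem passthru_fold2 (b : List Char) (ks : List (List Char))
    (hks : ∀ x ∈ ks, x ∈ pvKeywords ∧ x ≠ b) (hb : b ∈ pvKeywords) :
    ∀ v, foldRep ((b ++ [' ', ':', ' ']) ++ v) ks = (b ++ [' ', ':', ' ']) ++ foldRep v ks := by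
  induction ks with
  | nil => intro v; rfl
  | cons a ks ih =>
    intro v
    have ha := hks a (by simp)
    show foldRep (rep1 a ((b ++ [' ', ':', ' ']) ++ v)) ks
        = (b ++ [' ', ':', ' ']) ++ foldRep (rep1 a v) ks
    rw [passthru_rep a b ha.1 hb ha.2]
    exact ih (fun x hx => hks x (by simp [hx])) (rep1 a v)

theorem rep1_decomp (b l : List Char) :
    rep1 b l = l ∨ ∃ u w, l = u ++ ((b ++ [':']) ++ w)
      ∧ rep1 b l = u ++ ((b ++ [' ', ':', ' ']) ++ rep1 b w) := by
  induction l using rep1.induct b with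
  | case1 => left; exact rep1_nil b
  | case2 c t hp ih =>
    right
    obtain ⟨w, hw⟩ := List.isPrefixOf_iff_prefix.mp hp
    have hdrop : List.drop (b.length + 1) (c :: t) = w := by
      rw [← hw]
      have h : (b ++ [':']).length = b.length + 1 := by simp
      rw [← h, List.drop_left]
    exact ⟨[], w, by rw [← hw]; simp, by rw [rep1_pos b c t hp, hdrop]; simp⟩
  | case3 c t hp ih =>
    rcases ih with h | ⟨u, w, h1, h2⟩
    · left; rw [rep1_neg b c t hp, h]
    · right
      exact ⟨c :: u, w, by rw [h1]; simp, by rw [rep1_neg b c t hp, h2]; simp⟩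

theorem nodup_mid (s t : List (List Char)) (b : List Char) (h : (s ++ b :: t).Nodup) :
    b ∉ s ∧ b ∉ t := by
  rw [List.nodup_append] at h
  exact ⟨fun hb => h.2.2 b hb b (List.mem_cons_self ..) rfl,
    fun hb => (List.nodup_cons.mp h.2.1).1 hb⟩

theorem head_nomatch_pres (a b : List Char) (c : Char) (t : List Char)
    (ha : a ∈ pvKeywords) (h : ¬ (a ++ [':']) <+: (c :: t)) :
    ¬ (a ++ [':']) <+: (c :: rep1 b t) := by
  rcases rep1_decomp b t with heq | ⟨u, w, h1, h2⟩
  · rw [heq]; exact h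
  · rw [h2]
    intro hcon
    have hre : c :: (u ++ ((b ++ [' ', ':', ' ']) ++ rep1 b w))
        = ((c :: u) ++ b) ++ (' ' :: (':' :: (' ' :: rep1 b w))) := by simp
    rw [hre] at hcon
    by_cases hlen : (a ++ [':']).length ≤ ((c :: u) ++ b).length
    · have hpp : (a ++ [':']) <+: ((c :: u) ++ b) := by
        rcases List.prefix_or_prefix_of_prefix hcon (List.prefix_append _ _) with h' | h'
        · exact h'
        · have heq2 : (c :: u) ++ b = a ++ [':'] :=
            List.IsPrefix.eq_of_length h' (le_antisymm h'.length_le hlen)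
          rw [heq2]
      refine h ?_
      have hct : c :: t = ((c :: u) ++ b) ++ (':' :: w) := by rw [h1]; simp
      rw [hct]
      exact hpp.trans (List.prefix_append _ _)
    · have hi : ((c :: u) ++ b).length < (a ++ [':']).length := Nat.lt_of_not_le hlen
      have hsp : (a ++ [':'])[((c :: u) ++ b).length]'hi = ' ' := by
        rw [List.IsPrefix.getElem hcon hi,
          List.getElem_append_right (le_refl ((c :: u) ++ b).length)]
        simp
      have hlen2 : ((c :: u) ++ b).length < a.length + 1 := by
        simpa using hi
      by_cases hc : ((c :: u) ++ b).length < a.length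
      · rw [List.getElem_append_left hc] at hsp
        exact absurd (hsp ▸ List.getElem_mem _) (DC0 a ha).1
      · have heq3 : ((c :: u) ++ b).length = a.length := by omega
        rw [List.getElem_append_right (by omega)] at hsp
        simp at hsp

theorem fold_nomatch (c : Char) (ks : List (List Char)) :
    (∀ x ∈ ks, x ∈ pvKeywords) →
    ∀ t, (∀ a ∈ pvKeywords, ¬ (a ++ [':']) <+: (c :: t)) →
    foldRep (c :: t) ks = c :: foldRep t ks := by
  induction ks with
  | nil => intro _ t _; rfl
  | cons k ks ih =>
    intro hks t hno
    have hk := hks k (by simp)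
    have hstep : rep1 k (c :: t) = c :: rep1 k t :=
      rep1_neg _ _ _ (by simpa [List.isPrefixOf_iff_prefix] using hno k hk)
    show foldRep (rep1 k (c :: t)) ks = c :: foldRep (rep1 k t) ks
    rw [hstep]
    exact ih (fun x hx => hks x (by simp [hx])) (rep1 k t)
      (fun a ha => head_nomatch_pres a k c t ha (hno a ha))

theorem scan_none (c : Char) (t : List Char)
    (hf : pvKeywords.find? (fun k => (k ++ [':']).isPrefixOf (c :: t)) = none) :
    saniScan (c :: t) = c :: saniScan t := by
  rw [saniScan, hf]

theorem scan_some (c : Char) (t b : List Char)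
    (hf : pvKeywords.find? (fun k => (k ++ [':']).isPrefixOf (c :: t)) = some b) :
    saniScan (c :: t) = (b ++ [' ', ':', ' ']) ++ saniScan (List.drop (b.length + 1) (c :: t)) := by
  rw [saniScan, hf]

theorem chain_eq_scan : ∀ l : List Char, foldRep l pvKeywords = saniScan l := by
  have H : ∀ n (l : List Char), l.length ≤ n → foldRep l pvKeywords = saniScan l := by
    intro n
    induction n with
    | zero =>
      intro l hl
      have : l = [] := List.eq_nil_of_length_eq_zero (by omega)
      subst this
      rw [foldRep_nil, saniScan]
    | succ n ih =>
      intro l hl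
      cases l with
      | nil => rw [foldRep_nil, saniScan]
      | cons c t =>
        cases hf : pvKeywords.find? (fun k => (k ++ [':']).isPrefixOf (c :: t)) with
        | none =>
          have hno : ∀ a ∈ pvKeywords, ¬ (a ++ [':']) <+: (c :: t) := by
            intro a ha hcon
            have := List.find?_eq_none.mp hf a ha
            simp only [List.isPrefixOf_iff_prefix] at this
            exact absurd hcon (by simpa using this)
          rw [scan_none c t hf, fold_nomatch c pvKeywords (fun x hx => hx) t hno,
            ih t (by simp at hl; omega)]
        | some b =>
          have hpb : (b ++ [':']) <+: (c :: t) := by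
            have h' := List.find?_some hf
            simpa [List.isPrefixOf_iff_prefix] using h'
          have hbK : b ∈ pvKeywords := List.mem_of_find?_eq_some hf
          obtain ⟨v, hv⟩ := hpb
          obtain ⟨K₁, K₂, hK⟩ := List.mem_iff_append.mp hbK
          have hnd : pvKeywords.Nodup := by decide
          rw [hK] at hnd
          have hb12 := nodup_mid K₁ K₂ b hnd
          have hdrop : List.drop (b.length + 1) (c :: t) = v := by
            rw [← hv]
            have h5 : (b ++ [':']).length = b.length + 1 := by simp
            rw [← h5, List.drop_left]
          have hvlen : v.length ≤ n := by
            rw [← hv] at hl; simp at hl; omega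
          have m1 : ∀ x ∈ K₁, x ∈ pvKeywords ∧ x ≠ b := fun x hx =>
            ⟨hK ▸ List.mem_append_left _ hx, fun he => hb12.1 (he ▸ hx)⟩
          have m2 : ∀ x ∈ K₂, x ∈ pvKeywords ∧ x ≠ b := fun x hx =>
            ⟨hK ▸ List.mem_append_right _ (List.mem_cons_of_mem _ hx), fun he => hb12.2 (he ▸ hx)⟩
          rw [scan_some c t b hf, hdrop, ← ih v hvlen, ← hv, hK]
          calc foldRep ((b ++ [':']) ++ v) (K₁ ++ b :: K₂)
              = foldRep (rep1 b (foldRep ((b ++ [':']) ++ v) K₁)) K₂ := by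
                rw [foldRep, List.foldl_append]; rfl
            _ = foldRep (rep1 b ((b ++ [':']) ++ foldRep v K₁)) K₂ := by
                rw [passthru_fold1 b K₁ m1 hbK]
            _ = foldRep ((b ++ [' ', ':', ' ']) ++ rep1 b (foldRep v K₁)) K₂ := by
                rw [rep1_match]
            _ = (b ++ [' ', ':', ' ']) ++ foldRep (rep1 b (foldRep v K₁)) K₂ :=
                passthru_fold2 b K₂ m2 hbK _
            _ = (b ++ [' ', ':', ' ']) ++ foldRep v (K₁ ++ b :: K₂) := by
                conv_rhs => rw [foldRep, List.foldl_append]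
                rfl
  exact fun l => H l.length l (le_refl _)

-- ===== VERDICT (by name: the statement is the Claim_ definition above) =====
theorem sanitize_query_field_py_spec : Claim_equal_sanitize_query_field_py := by
  intro field_value _
  unfold Spec_sanitize_query_field_py sanitize_query_field_py sanitize_query_field_py_alt
  rw [foldA_eq, chain_eq_scan]
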